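-- pv_equiv track=rewrite | github.com/mbeulens/synpad | tools/gen_php_completions.py | _strip_attributes
-- ===== SOURCE A (Python) =====
-- def _strip_attributes(text: str) -> str:
--     """Remove `#[...]` attribute blocks with balanced bracket matching.
--     Attributes like `#[LanguageLevelTypeAware(['8.0' => 'CurlHandle'], default: 'resource')]`
--     contain nested brackets, so a naïve regex stops at the first `]`."""
--     out = []
--     i = 0
--     while i < len(text):
--         if text[i:i + 2] == '#[':
--             depth = 1
--             j = i + 2
--             while j < len(text) and depth > 0:
--                 if text[j] == '[':
--                     depth += 1
--                 elif text[j] == ']':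
--                     depth -= 1
--                 j += 1
--             if depth == 0:
--                 i = j
--                 continue
--         out.append(text[i])
--         i += 1
--     return ''.join(out)
-- ===== SOURCE B (Python) =====
-- def _attr_end(text, i):
--     """Index just past the balanced `#[...]` block opening at text[i:i+2], or None."""
--     depth = 1
--     j = i + 2
--     n = len(text)
--     while j < n:
--         c = text[j]
--         j += 1
--         if c == '[':
--             depth += 1
--         elif c == ']':
--             depth -= 1
--             if depth == 0:
--                 return j
--     return None
--
--
-- def _strip_attributes(text: str) -> str:
--     # Phase one: collect the (start, end) spans of balanced #[...] blocks.
--     spans = []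
--     i = 0
--     n = len(text)
--     while i < n:
--         if text[i:i + 2] == '#[':
--             j = _attr_end(text, i)
--             if j is not None:
--                 spans.append((i, j))
--                 i = j
--                 continue
--         i += 1
--     # Phase two: rebuild the text from the gaps between the spans.
--     parts = []
--     prev = 0
--     for start, end in spans:
--         parts.append(text[prev:start])
--         prev = end
--     parts.append(text[prev:])
--     return ''.join(parts)
-- ===== Notes on version B (the rewrite author's own statement) =====
-- stated objective: faster
-- what changed: B separates finding from deleting: phase one collects the (start,end) spans of balanced #[...] blocks (with an early-returning helper for the bracket match), phase two rebuilds the output by joining the slices between spans, instead of A's interleaved char-by-char append.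
import Mathlib
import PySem

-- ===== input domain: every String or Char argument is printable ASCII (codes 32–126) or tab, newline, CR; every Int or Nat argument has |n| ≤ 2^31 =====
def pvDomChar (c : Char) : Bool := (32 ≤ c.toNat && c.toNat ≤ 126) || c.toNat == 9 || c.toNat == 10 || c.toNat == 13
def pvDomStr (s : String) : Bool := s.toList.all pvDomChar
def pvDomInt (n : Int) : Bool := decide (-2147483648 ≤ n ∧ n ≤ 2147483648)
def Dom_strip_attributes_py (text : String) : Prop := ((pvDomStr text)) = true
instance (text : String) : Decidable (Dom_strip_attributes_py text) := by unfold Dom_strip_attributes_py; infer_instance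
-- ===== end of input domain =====

-- B rebuilds the output by joining the gap slices between collected spans of balanced
-- `#[...]` blocks, instead of A's interleaved char-by-char append (alternative decomposition).
-- (The `fuel` parameters are totality guards only; each loop advances its index by ≥ 1,
-- so the fuel the entry points supply is never exhausted.)

-- ===== PORT A =====
-- A's inner `while j < len(text) and depth > 0` loop, carrying (depth, j).
def pvScanA (cs : List Char) (fuel : Nat) (depth : Int) (j : Nat) : Int × Nat :=
  match fuel with
  | 0 => (depth, j)
  | fuel + 1 =>
    if h : j < cs.length ∧ 0 < depth then
      let c := cs[j]'h.1
      pvScanA cs fuel (if c = '[' then depth + 1 else if c = ']' then depth - 1 else depth) (j + 1)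
    else (depth, j)

-- A's outer while loop with its `out` accumulator.
def pvLoopA (cs : List Char) (fuel : Nat) (i : Nat) (out : List Char) : List Char :=
  match fuel with
  | 0 => out
  | fuel + 1 =>
    if h : i < cs.length then
      if PySem.List.slice cs (some (i : Int)) (some ((i : Int) + 2)) = ['#', '['] then
        let r := pvScanA cs cs.length 1 (i + 2)
        if r.1 = 0 then pvLoopA cs fuel r.2 out
        else pvLoopA cs fuel (i + 1) (out ++ [cs[i]'h])
      else pvLoopA cs fuel (i + 1) (out ++ [cs[i]'h])
    else out

def strip_attributes_py (text : String) : String :=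
  String.ofList (pvLoopA text.toList text.toList.length 0 [])

-- ===== PORT B =====
-- B's `_attr_end` helper: index just past the balanced block, or none.
def pvAttrEnd (cs : List Char) (fuel : Nat) (depth : Int) (j : Nat) : Option Nat :=
  match fuel with
  | 0 => none
  | fuel + 1 =>
    if h : j < cs.length then
      let c := cs[j]'h
      if c = '[' then pvAttrEnd cs fuel (depth + 1) (j + 1)
      else if c = ']' then
        if depth - 1 = 0 then some (j + 1) else pvAttrEnd cs fuel (depth - 1) (j + 1)
      else pvAttrEnd cs fuel depth (j + 1)
    else none

-- B's phase one: collect the (start, end) spans of balanced blocks.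
def pvSpansB (cs : List Char) (fuel : Nat) (i : Nat) : List (Nat × Nat) :=
  match fuel with
  | 0 => []
  | fuel + 1 =>
    if _h : i < cs.length then
      if PySem.List.slice cs (some (i : Int)) (some ((i : Int) + 2)) = ['#', '['] then
        match pvAttrEnd cs cs.length 1 (i + 2) with
        | some j => (i, j) :: pvSpansB cs fuel j
        | none => pvSpansB cs fuel (i + 1)
      else pvSpansB cs fuel (i + 1)
    else []

-- B's phase two: join the gap slices between the spans, then the tail slice.
def pvRebuildB (cs : List Char) (prev : Nat) : List (Nat × Nat) → List Char
  | [] => PySem.List.slice cs (some (prev : Int)) none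
  | (s, e) :: rest =>
      PySem.List.slice cs (some (prev : Int)) (some (s : Int)) ++ pvRebuildB cs e rest

def strip_attributes_py_alt (text : String) : String :=
  String.ofList (pvRebuildB text.toList 0 (pvSpansB text.toList text.toList.length 0))

-- ===== PRECONDITION & SPEC =====
def Spec_strip_attributes_py (text : String) (out : String) : Prop := out = strip_attributes_py_alt text
instance (text : String) (out : String) : Decidable (Spec_strip_attributes_py text out) := by unfold Spec_strip_attributes_py; infer_instance

-- ===== CLAIM (what is proved, stated in full; the proofs are below) =====
def Claim_equal_strip_attributes_py : Prop := ∀ (text : String), Dom_strip_attributes_py text → Spec_strip_attributes_py text (strip_attributes_py text)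

-- ===== LEMMAS AND PROOFS =====

theorem pvScanA_ge (cs : List Char) (fuel : Nat) (depth : Int) (j : Nat) :
    j ≤ (pvScanA cs fuel depth j).2 := by
  induction fuel generalizing depth j with
  | zero => exact le_refl j
  | succ fuel ih =>
      rw [pvScanA]
      split
      · exact le_trans (Nat.le_succ j) (ih _ (j + 1))
      · exact le_refl j

theorem pvScanA_zero (cs : List Char) (fuel : Nat) (j : Nat) :
    pvScanA cs fuel 0 j = (0, j) := by
  cases fuel with
  | zero => rfl
  | succ fuel => rw [pvScanA]; simp

-- A's inner scan and B's helper agree when given enough fuel: B returns `some j'`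
-- exactly when A's scan ends with depth 0, and then at the same index.
theorem pvAttrEnd_eq_scanA (cs : List Char) (fuel : Nat) (depth : Int) (j : Nat)
    (hd : 0 < depth) (hf : cs.length ≤ j + fuel) :
    pvAttrEnd cs fuel depth j =
      (if (pvScanA cs fuel depth j).1 = 0 then some (pvScanA cs fuel depth j).2 else none) := by
  induction fuel generalizing depth j with
  | zero =>
      rw [pvAttrEnd, pvScanA]
      simp only [show ¬ (j < cs.length ∧ 0 < depth) from fun hc => by omega]
      simp [show ¬ depth = 0 by omega]
  | succ fuel ih =>
      rw [pvAttrEnd, pvScanA]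
      by_cases hj : j < cs.length
      · simp only [dif_pos hj, dif_pos (show j < cs.length ∧ 0 < depth from ⟨hj, hd⟩)]
        by_cases hc1 : cs[j]'hj = '['
        · simp only [hc1, if_true]
          exact ih _ (j + 1) (by omega) (by omega)
        · by_cases hc2 : cs[j]'hj = ']'
          · simp only [if_neg hc1, if_pos hc2]
            by_cases hz : depth - 1 = 0
            · simp only [if_pos hz, hz, pvScanA_zero]
              simp
            · simp only [if_neg hz]
              exact ih _ (j + 1) (by omega) (by omega)
          · simp only [if_neg hc1, if_neg hc2]
            exact ih _ (j + 1) hd (by omega)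
      · simp only [dif_neg hj, dif_neg (show ¬ (j < cs.length ∧ 0 < depth) from fun hc => hj hc.1)]
        simp [show ¬ depth = 0 by omega]

-- accumulator lemma for A's loop
theorem pvLoopA_acc (cs : List Char) (fuel : Nat) (i : Nat) (out : List Char) :
    pvLoopA cs fuel i out = out ++ pvLoopA cs fuel i [] := by
  induction fuel generalizing i out with
  | zero => simp [pvLoopA]
  | succ fuel ih =>
      conv_lhs => rw [pvLoopA]
      conv_rhs => rw [pvLoopA]
      by_cases h : i < cs.length
      · simp only [dif_pos h]
        split_ifs with h1 h2
        · exact ih _ out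
        · rw [ih (i + 1) (out ++ [cs[i]'h]), ih (i + 1) ([] ++ [cs[i]'h])]
          simp
        · rw [ih (i + 1) (out ++ [cs[i]'h]), ih (i + 1) ([] ++ [cs[i]'h])]
          simp
      · simp [dif_neg h]

-- every span collected from position i starts at or after i
theorem pvSpansB_start_ge (cs : List Char) (fuel : Nat) (i : Nat) (s e : Nat)
    (rest : List (Nat × Nat)) (h : pvSpansB cs fuel i = (s, e) :: rest) : i ≤ s := by
  induction fuel generalizing i s e rest with
  | zero => simp [pvSpansB] at h
  | succ fuel ih =>
      rw [pvSpansB] at h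
      by_cases hi : i < cs.length
      · simp only [dif_pos hi] at h
        by_cases hsl : PySem.List.slice cs (some (i : Int)) (some ((i : Int) + 2)) = ['#', '[']
        · simp only [if_pos hsl] at h
          split at h
          · cases h; exact le_refl _
          · exact le_trans (Nat.le_succ i) (ih (i + 1) s e rest h)
        · simp only [if_neg hsl] at h
          exact le_trans (Nat.le_succ i) (ih (i + 1) s e rest h)
      · simp [hi] at h

-- stepping a gap by one character
theorem pvRebuildB_cons (cs : List Char) (i : Nat) (sps : List (Nat × Nat))
    (hi : i < cs.length) (hfirst : ∀ s e rest, sps = (s, e) :: rest → i < s) :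
    pvRebuildB cs i sps = cs[i] :: pvRebuildB cs (i + 1) sps := by
  cases sps with
  | nil =>
      simp only [pvRebuildB, PySem.List.slice_from_natCast]
      exact List.drop_eq_getElem_cons hi
  | cons p rest =>
      obtain ⟨s, e⟩ := p
      have hs : i < s := hfirst s e rest rfl
      simp only [pvRebuildB, PySem.List.slice_natCast]
      rw [List.drop_eq_getElem_cons hi]
      have : s - i = (s - (i + 1)) + 1 := by omega
      rw [this, List.take_succ_cons]
      simp

-- main invariant: A's remaining output from position i equals B's rebuild from i
theorem pvLoop_eq_rebuild (cs : List Char) (fuel : Nat) (i : Nat)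
    (hf : cs.length ≤ i + fuel) :
    pvLoopA cs fuel i [] = pvRebuildB cs i (pvSpansB cs fuel i) := by
  induction fuel generalizing i with
  | zero =>
      simp only [pvLoopA, pvSpansB, pvRebuildB, PySem.List.slice_from_natCast]
      rw [List.drop_of_length_le (by omega)]
  | succ fuel ih =>
      rw [pvLoopA, pvSpansB]
      by_cases h : i < cs.length
      · simp only [dif_pos h]
        by_cases hsl : PySem.List.slice cs (some (i : Int)) (some ((i : Int) + 2)) = ['#', '[']
        · simp only [if_pos hsl]
          have hbr := pvAttrEnd_eq_scanA cs cs.length 1 (i + 2) (by omega) (by omega)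
          by_cases hz : (pvScanA cs cs.length 1 (i + 2)).1 = 0
          · simp only [hz, reduceIte]
            rw [if_pos hz] at hbr
            split
            · rename_i j heq
              rw [hbr] at heq
              have hj : j = (pvScanA cs cs.length 1 (i + 2)).2 := (Option.some.inj heq).symm
              subst hj
              simp only [pvRebuildB, PySem.List.slice_natCast, Nat.sub_self, List.take_zero,
                List.nil_append]
              exact ih _ (by have := pvScanA_ge cs cs.length 1 (i + 2); omega)
            · rename_i heq
              rw [hbr] at heq; simp at heq
          · simp only [hz, reduceIte]
            rw [if_neg hz] at hbr
            split
            · rename_i j heq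
              rw [hbr] at heq; simp at heq
            · rw [pvLoopA_acc, ih (i + 1) (by omega)]
              rw [pvRebuildB_cons cs i _ h (fun s e rest hr =>
                lt_of_lt_of_le (Nat.lt_succ_self i) (pvSpansB_start_ge cs fuel (i + 1) s e rest hr))]
              simp
        · simp only [if_neg hsl]
          rw [pvLoopA_acc, ih (i + 1) (by omega)]
          rw [pvRebuildB_cons cs i _ h (fun s e rest hr =>
            lt_of_lt_of_le (Nat.lt_succ_self i) (pvSpansB_start_ge cs fuel (i + 1) s e rest hr))]
          simp
      · simp only [dif_neg h]
        simp only [pvRebuildB, PySem.List.slice_from_natCast]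
        rw [List.drop_of_length_le (by omega)]

-- ===== VERDICT (by name: the statement is the Claim_ definition above) =====
theorem strip_attributes_py_spec : Claim_equal_strip_attributes_py := by
  intro text _
  unfold Spec_strip_attributes_py strip_attributes_py strip_attributes_py_alt
  rw [pvLoop_eq_rebuild text.toList text.toList.length 0 (by omega)]
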